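-- pv_equiv track=rewrite | github.com/AlterFritz88/pybits | bite180.py | group_names_by_country
-- ===== SOURCE A (Python) =====
-- from collections import defaultdict
--
-- data = """last_name,first_name,country_code
-- Watsham,Husain,ID
-- Harrold,Alphonso,BR
-- Apdell,Margo,CN
-- Tomblings,Deerdre,RU
-- Wasielewski,Sula,ID
-- Jeffry,Rudolph,TD
-- Brenston,Luke,SE
-- Parrett,Ines,CN
-- Braunle,Kermit,PL
-- Halbard,Davie,CN"""
--
-- def group_names_by_country(data: str = data) -> defaultdict:
--     countries = defaultdict(list)
--     data = data.split('\n')[1:]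
--     for piece in data:
--         piece = piece.split(',')
--         if piece[-1] not in countries.keys():
--             countries[piece[-1]] = [' '.join(piece[:-1][::-1])]
--         else:
--             countries[piece[-1]].append(' '.join(piece[:-1][::-1]))
--     return countries
-- ===== SOURCE B (Python) =====
-- from collections import defaultdict
--
-- data = """last_name,first_name,country_code
-- Watsham,Husain,ID
-- Harrold,Alphonso,BR
-- Apdell,Margo,CN
-- Tomblings,Deerdre,RU
-- Wasielewski,Sula,ID
-- Jeffry,Rudolph,TD
-- Brenston,Luke,SE
-- Parrett,Ines,CN
-- Braunle,Kermit,PL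
-- Halbard,Davie,CN"""
--
--
-- def group_names_by_country(data: str = data) -> defaultdict:
--     # Parse once into (country, name) pairs, then build each group
--     # with one comprehension per distinct country (first-seen order).
--     rows = [line.split(',') for line in data.split('\n')[1:]]
--     pairs = [(r[-1], ' '.join(r[:-1][::-1])) for r in rows]
--     result = defaultdict(list)
--     for k in dict.fromkeys(key for key, _ in pairs):
--         result[k] = [name for key, name in pairs if key == k]
--     return result
-- ===== Notes on version B (the rewrite author's own statement) =====
-- stated objective: alternative
-- what changed: Replaces the single-pass dict-accumulation loop by a parse-to-pairs pass followed by a per-distinct-country comprehension (dict.fromkeys for first-seen key order), so the conditional insert/append on a growing dict disappears.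
import Mathlib
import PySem

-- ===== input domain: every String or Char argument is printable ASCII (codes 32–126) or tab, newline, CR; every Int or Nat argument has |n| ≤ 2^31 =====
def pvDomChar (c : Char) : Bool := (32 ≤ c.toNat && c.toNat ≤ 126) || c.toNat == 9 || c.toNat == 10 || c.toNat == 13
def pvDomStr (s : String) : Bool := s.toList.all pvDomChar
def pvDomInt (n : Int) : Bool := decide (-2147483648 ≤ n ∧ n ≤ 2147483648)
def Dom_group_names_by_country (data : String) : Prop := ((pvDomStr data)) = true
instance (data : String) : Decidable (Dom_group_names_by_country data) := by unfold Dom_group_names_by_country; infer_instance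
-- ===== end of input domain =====

-- ===== PORT A =====
-- B regroups by a per-distinct-country scan over parsed pairs instead of A's conditional
-- insert/append into a growing dict; alternative decomposition, same results.
def group_names_by_country (data : String) : List (String × List String) :=
  let lines := ((PySem.Str.split? data "\n").getD []).drop 1
  (lines.foldl (fun countries piece =>
      let fields := (PySem.Str.split? piece ",").getD []
      let key := (PySem.List.pyGet? fields (-1)).getD ""
      if countries.contains key = false then
        countries.insert key [PySem.Str.join " " ((PySem.List.slice fields none (some (-1))).reverse)]
      else
        countries.modify key []
          (· ++ [PySem.Str.join " " ((PySem.List.slice fields none (some (-1))).reverse)]))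
    (PySem.Dict.empty : PySem.Dict String (List String))).items

-- ===== PORT B =====
def group_names_by_country_alt (data : String) : List (String × List String) :=
  let rows := (((PySem.Str.split? data "\n").getD []).drop 1).map
    (fun line => (PySem.Str.split? line ",").getD [])
  let pairs := rows.map (fun r =>
    ((PySem.List.pyGet? r (-1)).getD "",
     PySem.Str.join " " ((PySem.List.slice r none (some (-1))).reverse)))
  ((PySem.List.dedup (pairs.map Prod.fst)).foldl (fun result k =>
      result.insert k ((pairs.filter (fun p => p.1 == k)).map (·.2)))
    (PySem.Dict.empty : PySem.Dict String (List String))).items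

-- ===== PRECONDITION & SPEC =====
def Spec_group_names_by_country (data : String) (out : List (String × List String)) : Prop := out = group_names_by_country_alt data
instance (data : String) (out : List (String × List String)) : Decidable (Spec_group_names_by_country data out) := by unfold Spec_group_names_by_country; infer_instance

-- ===== CLAIM (what is proved, stated in full; the proofs are below) =====
def Claim_equal_group_names_by_country : Prop := ∀ (data : String), Dom_group_names_by_country data → Spec_group_names_by_country data (group_names_by_country data)

-- ===== LEMMAS AND PROOFS =====

-- A's if/else (insert when fresh, append when present) is exactly one dict `modify` step.
theorem branch_eq_modify (d : PySem.Dict String (List String)) (k : String) (n : String) :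
    (if d.contains k = false then d.insert k [n] else d.modify k [] (· ++ [n]))
      = d.modify k [] (· ++ [n]) := by
  by_cases h : d.contains k = false
  · simp only [h, if_true]
    simp only [PySem.Dict.modify, PySem.Dict.insert, h, Bool.false_eq_true, reduceIte,
      PySem.Dict.get?_eq_none_iff_contains, PySem.Dict.getD_of_get?_eq_none, List.nil_append]
  · simp [h]

-- A's whole loop, rewritten as a fold of `modify` steps over the parsed (country, name) pairs.
theorem a_loop_eq (lines : List String) :
    lines.foldl (fun countries piece =>
        let fields := (PySem.Str.split? piece ",").getD []
        let key := (PySem.List.pyGet? fields (-1)).getD ""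
        if countries.contains key = false then
          countries.insert key [PySem.Str.join " " ((PySem.List.slice fields none (some (-1))).reverse)]
        else
          countries.modify key []
            (· ++ [PySem.Str.join " " ((PySem.List.slice fields none (some (-1))).reverse)]))
      (PySem.Dict.empty : PySem.Dict String (List String))
    = (lines.map (fun piece =>
        let fields := (PySem.Str.split? piece ",").getD []
        ((PySem.List.pyGet? fields (-1)).getD "",
         PySem.Str.join " " ((PySem.List.slice fields none (some (-1))).reverse)))).foldl
        (fun d p => d.modify p.1 [] (· ++ [p.2])) PySem.Dict.empty := by
  conv_rhs => rw [List.foldl_map]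
  refine PySem.List.foldl_congr_mem lines _ _ _ (fun d piece _ => ?_)
  simpa using branch_eq_modify d _ _

theorem modify_fold_items (pairs : List (String × String)) :
    ((pairs.foldl (fun d p => d.modify p.1 [] (· ++ [p.2]))
        (PySem.Dict.empty : PySem.Dict String (List String))).items)
    = (PySem.List.dedup (pairs.map Prod.fst)).map
        (fun k => (k, (pairs.filter (fun p => p.1 == k)).map (·.2))) := by
  have hnd : ((pairs.foldl (fun d p => d.modify p.1 [] (· ++ [p.2]))
      (PySem.Dict.empty : PySem.Dict String (List String))).keys).Nodup := by
    exact PySem.Dict.nodup_keys_foldl_modify_key pairs Prod.fst [] (fun _ p v => v ++ [p.2]) _ (by simp [PySem.Dict.empty, PySem.Dict.keys])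
  have hkeys : ((pairs.foldl (fun d p => d.modify p.1 [] (· ++ [p.2]))
      (PySem.Dict.empty : PySem.Dict String (List String))).keys)
      = PySem.List.dedup (pairs.map Prod.fst) := by
    have := PySem.Dict.keys_foldl_modify_key pairs Prod.fst ([] : List String)
      (fun _ p v => v ++ [p.2]) (PySem.Dict.empty : PySem.Dict String (List String))
    simpa [PySem.Set.update, PySem.Set.ofList] using this
  rw [PySem.Dict.items_eq_map_keys _ hnd [], hkeys]
  refine List.map_congr_left (fun k hk => ?_)
  have := PySem.Dict.getD_foldl_modify_append pairs
    (PySem.Dict.empty : PySem.Dict String (List String)) k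
  simp only [this]
  simp [PySem.Dict.empty, PySem.Dict.getD, PySem.Dict.get?]

theorem b_fold_items (pairs : List (String × String)) :
    ((PySem.List.dedup (pairs.map Prod.fst)).foldl (fun result k =>
        result.insert k ((pairs.filter (fun p => p.1 == k)).map (·.2)))
      (PySem.Dict.empty : PySem.Dict String (List String))).items
    = (PySem.List.dedup (pairs.map Prod.fst)).map
        (fun k => (k, (pairs.filter (fun p => p.1 == k)).map (·.2))) := by
  have h := PySem.Dict.items_foldl_insert_fresh (PySem.List.dedup (pairs.map Prod.fst))
    (fun k => k) (fun k => (pairs.filter (fun p => p.1 == k)).map (·.2))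
    (PySem.Dict.empty : PySem.Dict String (List String))
    (fun a _ => by simp [PySem.Dict.empty, PySem.Dict.contains])
    (by simpa using PySem.List.nodup_dedup (pairs.map Prod.fst))
  simpa [PySem.Dict.empty, PySem.Dict.items] using h

-- ===== VERDICT (by name: the statement is the Claim_ definition above) =====
theorem group_names_by_country_spec : Claim_equal_group_names_by_country := by
  intro data _
  unfold Spec_group_names_by_country
  simp only [group_names_by_country, group_names_by_country_alt]
  -- B's two map passes (split, then (country, name)) fuse into A's single parsing map
  have he : List.map (fun r =>
        ((PySem.List.pyGet? r (-1)).getD "",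
         PySem.Str.join " " ((PySem.List.slice r none (some (-1))).reverse)))
      (List.map (fun line => (PySem.Str.split? line ",").getD [])
        (((PySem.Str.split? data "\n").getD []).drop 1))
      = List.map (fun piece =>
        let fields := (PySem.Str.split? piece ",").getD []
        ((PySem.List.pyGet? fields (-1)).getD "",
         PySem.Str.join " " ((PySem.List.slice fields none (some (-1))).reverse)))
        (((PySem.Str.split? data "\n").getD []).drop 1) := by
    rw [List.map_map]; rfl
  rw [he, a_loop_eq, modify_fold_items, b_fold_items]
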